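-- pv_equiv track=rewrite | github.com/leonardolarrad/teg | misc/gen_members_visitor.py | format_bindings
-- ===== SOURCE A (Python) =====
-- def format_bindings(i):
--     """Format the bindings for `i` members.
--        Eg. _001, _002, _003, ...
--     """
--     variables = [f'_{str(j).zfill(3)}' for j in range(1, i+1)]
--     formatted_bindings = ""
--
--     for idx, var in enumerate(variables):
--         if idx > 0 and idx % 20 == 0:
--             formatted_bindings += "\n            "
--         formatted_bindings += var
--
--         if idx < len(variables) - 1:
--             formatted_bindings += ", "
--
--     return formatted_bindings
-- ===== SOURCE B (Python) =====
-- def format_bindings(i):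
--     """Format the bindings for `i` members.
--        Eg. _001, _002, _003, ...
--     """
--     names = [f'_{j:03d}' for j in range(1, i + 1)]
--     groups = [', '.join(names[k:k + 20]) for k in range(0, len(names), 20)]
--     return ', \n            '.join(groups)
-- ===== Notes on version B (the rewrite author's own statement) =====
-- stated objective: simpler
-- what changed: Replaces A's index-modular accumulator loop (newline at every twentieth index, comma unless last) by slicing the name list into groups of twenty and joining: comma-join inside each group, comma-newline-indent-join between groups.
import Mathlib
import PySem

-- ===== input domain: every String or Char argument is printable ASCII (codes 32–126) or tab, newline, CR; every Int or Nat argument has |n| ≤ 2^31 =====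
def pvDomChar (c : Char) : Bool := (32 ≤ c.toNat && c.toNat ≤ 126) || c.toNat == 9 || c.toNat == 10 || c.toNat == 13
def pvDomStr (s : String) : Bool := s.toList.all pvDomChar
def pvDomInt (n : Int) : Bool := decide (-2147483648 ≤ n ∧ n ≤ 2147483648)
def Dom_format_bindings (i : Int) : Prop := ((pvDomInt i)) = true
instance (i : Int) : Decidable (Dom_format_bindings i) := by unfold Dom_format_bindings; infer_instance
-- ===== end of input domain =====

-- B replaces A's index-modular accumulator loop by chunking the name list into
-- groups of 20 and joining (objective: simpler decomposition, same cost).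

-- ===== PORT A =====
-- shared name builder: f'_{str(j).zfill(3)}' (B's f'_{j:03d}' is the same string for the
-- j ≥ 1 that range(1, i+1) produces); PySem.Str.zfill is exact for str.zfill
def pvBindName (j : Int) : String := "_" ++ PySem.Str.zfill (PySem.Int.toStr j) 3

def format_bindings (i : Int) : String :=
  let vars := (PySem.List.pyRange 1 (i + 1) 1).map pvBindName
  (PySem.List.enumerate vars 0).foldl
    (fun acc p =>
      let acc1 := if 0 < p.1 ∧ PySem.Int.mod p.1 20 = 0 then acc ++ "\n            " else acc
      let acc2 := acc1 ++ p.2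
      if p.1 < (vars.length : Int) - 1 then acc2 ++ ", " else acc2)
    ""

-- ===== PORT B =====
def format_bindings_alt (i : Int) : String :=
  let names := (PySem.List.pyRange 1 (i + 1) 1).map pvBindName
  let groups := (PySem.List.pyRange 0 (names.length : Int) 20).map
    (fun k => PySem.Str.join ", " (PySem.List.slice names (some k) (some (k + 20))))
  PySem.Str.join ", \n            " groups

-- ===== PRECONDITION & SPEC =====
def Spec_format_bindings (i : Int) (out : String) : Prop := out = format_bindings_alt i
instance (i : Int) (out : String) : Decidable (Spec_format_bindings i out) := by unfold Spec_format_bindings; infer_instance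

-- ===== CLAIM (what is proved, stated in full; the proofs are below) =====
def Claim_equal_format_bindings : Prop := ∀ (i : Int), Dom_format_bindings i → Spec_format_bindings i (format_bindings i)

-- ===== LEMMAS AND PROOFS =====

-- A's accumulator loop, as a recursion over char lists (index k is the global position)
def pvG : Int → List (List Char) → List Char
  | _, [] => []
  | k, [v] => (if 0 < k ∧ PySem.Int.mod k 20 = 0 then "\n            ".toList else []) ++ v
  | k, v :: r :: rs =>
      (if 0 < k ∧ PySem.Int.mod k 20 = 0 then "\n            ".toList else []) ++ v ++
        ", ".toList ++ pvG (k + 1) (r :: rs)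

-- B's chunked join, as a recursion over char lists (chunks of 20 = head + 19 of the tail)
def pvH : List (List Char) → List Char
  | [] => []
  | v :: rest =>
      PySem.Chars.join ", ".toList (v :: rest.take 19) ++
        (if rest.length ≤ 19 then [] else ", \n            ".toList ++ pvH (rest.drop 19))
termination_by vs => vs.length
decreasing_by simp

-- A's foldl over enumerate equals pvG (acc and start index generalized)
theorem pvA_fold (vs : List String) (k n : Int) (acc : String) (h : n = k + vs.length) :
    ((PySem.List.enumerate vs k).foldl
      (fun acc p =>
        let acc1 := if 0 < p.1 ∧ PySem.Int.mod p.1 20 = 0 then acc ++ "\n            " else acc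
        let acc2 := acc1 ++ p.2
        if p.1 < n - 1 then acc2 ++ ", " else acc2) acc).toList
    = acc.toList ++ pvG k (vs.map String.toList) := by
  induction vs generalizing k acc with
  | nil => simp [PySem.List.enumerate_nil, pvG]
  | cons v rest ih =>
    rw [PySem.List.enumerate_cons, List.foldl_cons]
    cases rest with
    | nil =>
      have hlt : ¬ (k < n - 1) := by simp at h; omega
      simp only [hlt, if_false, PySem.List.enumerate_nil, List.foldl_nil, List.map_cons,
        List.map_nil, pvG]
      split_ifs <;> simp [String.toList_append]
    | cons r rs =>
      have hlt : k < n - 1 := by simp at h; omega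
      rw [ih (k + 1) _ (by simp at h ⊢; omega)]
      simp only [hlt, if_true, List.map_cons, pvG]
      split_ifs <;> simp [String.toList_append]

-- a chunk whose interior indices are not multiples of 20 flattens to a plain join
theorem pvG_flat (vs : List (List Char)) (k : Int)
    (hin : ∀ j : Nat, 0 < j → j < vs.length → PySem.Int.mod (k + j) 20 ≠ 0) (hne : vs ≠ []) :
    pvG k vs = (if 0 < k ∧ PySem.Int.mod k 20 = 0 then "\n            ".toList else []) ++
      PySem.Chars.join ", ".toList vs := by
  induction vs generalizing k with
  | nil => exact absurd rfl hne
  | cons v rest ih =>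
    cases rest with
    | nil => simp [pvG, PySem.Chars.join_singleton]
    | cons r rs =>
      have h1 : PySem.Int.mod (k + 1) 20 ≠ 0 := by
        have := hin 1 (by omega) (by simp); simpa using this
      have h1' : ¬ (0 < k + 1 ∧ PySem.Int.mod (k + 1) 20 = 0) := fun hc => h1 hc.2
      rw [pvG, ih (k + 1) (fun j hj hj2 => by
            have h2 := hin (j + 1) (by omega) (by simp at hj2 ⊢; omega)
            push_cast at h2
            rw [show (k + 1) + (j : Int) = k + ((j : Int) + 1) by ring]
            exact h2) (by simp),
        if_neg h1', PySem.Chars.join_cons_cons]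
      simp

-- pvG splits at any interior point
theorem pvG_split (xs ys : List (List Char)) (k : Int) (hx : xs ≠ []) (hy : ys ≠ []) :
    pvG k (xs ++ ys) = pvG k xs ++ ", ".toList ++ pvG (k + xs.length) ys := by
  induction xs generalizing k with
  | nil => exact absurd rfl hx
  | cons x xs ih =>
    cases xs with
    | nil =>
      cases ys with
      | nil => exact absurd rfl hy
      | cons y ys => simp [pvG]
    | cons x2 xs2 =>
      rw [List.cons_append, List.cons_append, pvG]
      rw [show x2 :: (xs2 ++ ys) = (x2 :: xs2) ++ ys from rfl, ih (k + 1) (by simp), pvG]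
      simp only [List.length_cons]
      rw [show k + 1 + ((xs2.length + 1 : Nat) : Int) = k + ((xs2.length + 1 + 1 : Nat) : Int) by
        push_cast; ring]
      simp [List.append_assoc]

-- at an index that is a multiple of 20, pvG is a chunk followed by pvG of the rest = pvH
theorem pvG_chunk (vs : List (List Char)) (m : Nat) (hne : vs ≠ []) :
    pvG (20 * m) vs = (if 0 < (20 * m : Int) then "\n            ".toList else []) ++ pvH vs := by
  induction hfuel : vs.length using Nat.strong_induction_on generalizing vs m with
  | _ n ih =>
  subst hfuel
  have hmod : PySem.Int.mod (20 * (m : Int)) 20 = 0 := by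
    rw [PySem.Int.mod_eq_zero_iff_dvd]; exact dvd_mul_right 20 (m : Int)
  obtain ⟨v, rest, rfl⟩ : ∃ v rest, vs = v :: rest := by
    cases vs with
    | nil => exact absurd rfl hne
    | cons v rest => exact ⟨v, rest, rfl⟩
  by_cases h20 : (v :: rest).length ≤ 20
  · -- a single chunk: no interior index is a multiple of 20
    have hrest : rest.length ≤ 19 := by simp at h20 ⊢; omega
    rw [pvG_flat _ _ (fun j hj hj2 => by
        intro hc
        rw [PySem.Int.mod_eq_zero_iff_dvd] at hc
        simp at hj2
        omega) (by simp)]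
    rw [pvH, List.take_of_length_le hrest, if_pos hrest]
    simp
  · -- chunk of 20 followed by the rest
    have hlen : 20 < (v :: rest).length := by omega
    have htake : ((v :: rest).take 20).length = 20 := by
      rw [List.length_take]; omega
    conv_lhs => rw [← List.take_append_drop 20 (v :: rest)]
    rw [pvG_split _ _ _ (by intro hc; rw [hc] at htake; simp at htake)
        (by intro hc; rw [List.drop_eq_nil_iff] at hc; omega),
      pvG_flat _ _ (fun j hj hj2 => by
        intro hc
        rw [PySem.Int.mod_eq_zero_iff_dvd] at hc
        rw [htake] at hj2
        omega) (by intro hc; rw [hc] at htake; simp at htake),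
      htake]
    rw [show (20 * (m : Int)) + ((20 : Nat) : Int) = 20 * ((m + 1 : Nat) : Int) by push_cast; ring]
    rw [ih ((v :: rest).drop 20).length (by rw [List.length_drop]; omega) _ (m + 1)
        (by intro hc; rw [List.drop_eq_nil_iff] at hc; omega) rfl]
    rw [if_pos (by positivity : (0 : Int) < 20 * ((m + 1 : Nat) : Int))]
    rw [pvH, if_neg (by simp at hlen; omega : ¬ rest.length ≤ 19)]
    rw [show (v :: rest).take 20 = v :: rest.take 19 from List.take_succ_cons,
      show (v :: rest).drop 20 = rest.drop 19 from List.drop_succ_cons,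
      show ", \n            ".toList = ", ".toList ++ "\n            ".toList by decide]
    simp [List.append_assoc]

theorem pvG_eq_pvH (vs : List (List Char)) : pvG 0 vs = pvH vs := by
  cases vs with
  | nil => simp [pvG, pvH]
  | cons v rest => simpa using pvG_chunk (v :: rest) 0 (by simp)

-- join over a cons with a nonempty tail (case split over Chars.join_singleton/join_cons_cons)
theorem pvChars_join_cons (sep x : List Char) (t : List (List Char)) (h : t ≠ []) :
    PySem.Chars.join sep (x :: t) = x ++ sep ++ PySem.Chars.join sep t := by
  cases t with
  | nil => exact absurd rfl h
  | cons y ys => exact PySem.Chars.join_cons_cons sep x y ys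

-- B's range-of-chunk-starts join equals pvH (stated at the Nat/Chars level)
theorem pvB_core (ws : List (List Char)) :
    PySem.Chars.join ", \n            ".toList
      ((List.range ((ws.length + 19) / 20)).map
        (fun j => PySem.Chars.join ", ".toList ((ws.drop (20 * j)).take 20)))
    = pvH ws := by
  induction hfuel : ws.length using Nat.strong_induction_on generalizing ws with
  | _ n ih =>
  subst hfuel
  cases ws with
  | nil => simp [pvH, PySem.Chars.join_nil]
  | cons v rest =>
    by_cases h19 : rest.length ≤ 19
    · have h1 : ((v :: rest).length + 19) / 20 = 1 := by simp; omega
      rw [h1, List.range_one, List.map_cons, List.map_nil, PySem.Chars.join_singleton,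
        pvH, if_pos h19, List.take_of_length_le h19, Nat.mul_zero, List.drop_zero,
        List.take_of_length_le (by simp; omega), List.append_nil]
    · have hm : ((v :: rest).length + 19) / 20 = (((rest.drop 19).length + 19) / 20) + 1 := by
        rw [List.length_drop]; simp; omega
      have hM : 1 ≤ ((rest.drop 19).length + 19) / 20 := by rw [List.length_drop]; omega
      rw [hm, List.range_succ_eq_map, List.map_cons, List.map_map]
      rw [pvChars_join_cons _ _ _ (by
        intro hc
        rw [List.map_eq_nil_iff, List.range_eq_nil] at hc
        omega)]
      have harg : ((fun j => PySem.Chars.join ", ".toList (((v :: rest).drop (20 * j)).take 20))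
            ∘ Nat.succ)
          = (fun j => PySem.Chars.join ", ".toList (((rest.drop 19).drop (20 * j)).take 20)) := by
        funext j
        simp only [Function.comp_apply]
        rw [show 20 * Nat.succ j = (20 * j + 19) + 1 by omega, List.drop_succ_cons,
          List.drop_drop]
        rw [Nat.add_comm (20 * j) 19]
      rw [harg, ih ((rest.drop 19).length) (by simp) _ rfl]
      rw [pvH, if_neg h19, Nat.mul_zero, List.drop_zero, List.take_succ_cons]
      simp [List.append_assoc]

theorem pvB_bridge (vs : List String) :
    (PySem.Str.join ", \n            "
      ((PySem.List.pyRange 0 (vs.length : Int) 20).map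
        (fun k => PySem.Str.join ", " (PySem.List.slice vs (some k) (some (k + 20)))))).toList
    = pvH (vs.map String.toList) := by
  refine Eq.trans ?_ (pvB_core (vs.map String.toList))
  rw [PySem.Str.toList_join, List.map_map,
    PySem.List.pyRange_of_pos 0 ((vs.length : Int)) (by norm_num), List.map_map]
  have hm : (if (0 : Int) < (vs.length : Int)
        then (((vs.length : Int) - 0 + 20 - 1) / 20).toNat else 0)
      = (vs.length + 19) / 20 := by
    split_ifs with h
    · rw [show ((vs.length : Int) - 0 + 20 - 1) = ((vs.length + 19 : Nat) : Int) by push_cast; ring,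
        show (20 : Int) = ((20 : Nat) : Int) from rfl, ← Int.natCast_ediv]
      exact Int.toNat_natCast _
    · omega
  rw [hm, List.length_map]
  refine congrArg _ (List.map_congr_left ?_)
  intro j hj
  simp only [Function.comp_apply]
  rw [PySem.Str.toList_join,
    show (0 : Int) + 20 * (j : Int) = ((20 * j : Nat) : Int) by push_cast; ring,
    show ((20 * j : Nat) : Int) + 20 = ((20 * j : Nat) : Int) + ((20 : Nat) : Int) from rfl,
    PySem.List.slice_natCast_add, List.map_take, List.map_drop]

-- ===== VERDICT (by name: the statement is the Claim_ definition above) =====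
theorem format_bindings_spec : Claim_equal_format_bindings := by
  intro i _
  unfold Spec_format_bindings format_bindings format_bindings_alt
  apply String.toList_inj.mp
  rw [pvA_fold _ 0 _ "" (by simp), pvB_bridge]
  simp [pvG_eq_pvH]
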